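-- pv_equiv track=rewrite | github.com/FisherXZ/lead-gen-agent | agent/src/runtime/compactor.py | _merge_summaries
-- ===== SOURCE A (Python) =====
-- def _format_summary(summary: str) -> str:
--     """Convert <summary>...</summary> XML to plain readable text.
--
--     Strips the XML tags and prepends 'Summary:\\n'.
--     Falls back to returning the string as-is if tags aren't present.
--     """
--     if "<summary>" in summary and "</summary>" in summary:
--         start = summary.find("<summary>") + len("<summary>")
--         end = summary.find("</summary>")
--         inner = summary[start:end].strip()
--         return "Summary:\n" + inner
--     return summary.strip()
--
-- def _extract_highlights(summary: str) -> list[str]: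
--     """Return all non-timeline bullet lines from a summary string."""
--     formatted = _format_summary(summary)
--     lines: list[str] = []
--     in_timeline = False
--     for line in formatted.splitlines():
--         stripped = line.rstrip()
--         if not stripped or stripped in ("Summary:", "Conversation summary:"):
--             continue
--         if stripped == "- Key timeline:":
--             in_timeline = True
--             continue
--         if in_timeline:
--             continue
--         lines.append(stripped)
--     return lines
--
-- def _extract_timeline(summary: str) -> list[str]:
--     """Return the timeline lines from a summary string."""
--     formatted = _format_summary(summary)
--     lines: list[str] = []
--     in_timeline = False
--     for line in formatted.splitlines():
--         stripped = line.rstrip()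
--         if stripped == "- Key timeline:":
--             in_timeline = True
--             continue
--         if not in_timeline:
--             continue
--         if not stripped:
--             break
--         lines.append(stripped)
--     return lines
--
-- def _merge_summaries(existing: str, new_summary: str) -> str:
--     """Merge a prior compaction summary with a new one.
--
--     Produces a <summary> block with:
--     - "Previously compacted context" (highlights from existing, no timeline)
--     - "Newly compacted context" (highlights from new_summary)
--     - "Key timeline" (timeline from new_summary only)
--     """
--     prev_highlights = _extract_highlights(existing)
--     new_highlights = _extract_highlights(new_summary)
--     new_timeline = _extract_timeline(new_summary)
--
--     lines: list[str] = ["<summary>", "Conversation summary:"]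
--     if prev_highlights:
--         lines.append("- Previously compacted context:")
--         lines.extend(f"  {line}" for line in prev_highlights)
--     if new_highlights:
--         lines.append("- Newly compacted context:")
--         lines.extend(f"  {line}" for line in new_highlights)
--     if new_timeline:
--         lines.append("- Key timeline:")
--         lines.extend(new_timeline)
--     lines.append("</summary>")
--     return "\n".join(lines)
-- ===== SOURCE B (Python) =====
-- def _format_summary(summary: str) -> str:
--     """Convert <summary>...</summary> XML to plain readable text."""
--     if "<summary>" in summary and "</summary>" in summary:
--         start = summary.find("<summary>") + len("<summary>")
--         end = summary.find("</summary>")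
--         inner = summary[start:end].strip()
--         return "Summary:\n" + inner
--     return summary.strip()
--
-- def _parse_summary(summary: str) -> tuple[list[str], list[str]]:
--     """One pass over the formatted lines: highlights before the timeline
--     marker (blanks/headers skipped), timeline after it up to the first blank."""
--     highlights: list[str] = []
--     timeline: list[str] = []
--     state = "high"
--     for line in _format_summary(summary).splitlines():
--         s = line.rstrip()
--         if s == "- Key timeline:":
--             if state == "high":
--                 state = "time"
--             continue
--         if state == "high":
--             if s and s not in ("Summary:", "Conversation summary:"):
--                 highlights.append(s)
--         elif state == "time":
--             if not s:
--                 state = "done"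
--             else:
--                 timeline.append(s)
--     return highlights, timeline
--
-- def _section(header: str, items: list[str]) -> list[str]:
--     return [header] + items if items else []
--
-- def _merge_summaries(existing: str, new_summary: str) -> str:
--     prev_highlights, _ = _parse_summary(existing)
--     new_highlights, new_timeline = _parse_summary(new_summary)
--     lines = (
--         ["<summary>", "Conversation summary:"]
--         + _section("- Previously compacted context:", ["  " + h for h in prev_highlights])
--         + _section("- Newly compacted context:", ["  " + h for h in new_highlights])
--         + _section("- Key timeline:", new_timeline)
--         + ["</summary>"]
--     )
--     return "\n".join(lines)
-- ===== Notes on version B (the rewrite author's own statement) =====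
-- stated objective: simpler
-- what changed: The two separate extractor line-scans of A (highlights scan and timeline scan, each re-formatting the summary) are replaced by one parse helper that formats once and classifies the lines in a single three-state pass, and the conditional section-appending is replaced by a section helper concatenation.
import Mathlib
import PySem

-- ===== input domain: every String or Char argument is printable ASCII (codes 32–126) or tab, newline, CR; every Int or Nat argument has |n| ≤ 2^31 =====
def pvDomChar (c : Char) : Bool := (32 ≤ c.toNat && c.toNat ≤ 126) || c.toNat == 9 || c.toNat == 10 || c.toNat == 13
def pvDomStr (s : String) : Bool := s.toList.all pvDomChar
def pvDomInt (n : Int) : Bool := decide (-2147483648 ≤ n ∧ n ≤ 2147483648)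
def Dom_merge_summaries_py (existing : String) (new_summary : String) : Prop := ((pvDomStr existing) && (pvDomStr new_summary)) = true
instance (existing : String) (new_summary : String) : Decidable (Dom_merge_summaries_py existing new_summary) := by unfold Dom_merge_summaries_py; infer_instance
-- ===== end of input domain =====

-- B replaces A's two separate extractor scans by a single three-state pass and a section-helper assembly (a simpler decomposition, same cost).

-- ===== PORT A =====
-- _format_summary (used verbatim by both Pythons)
def pvFormatSummary (summary : String) : String :=
  if PySem.Str.isIn "<summary>" summary && PySem.Str.isIn "</summary>" summary then
    let start := PySem.Str.find summary "<summary>" + 9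
    let e := PySem.Str.find summary "</summary>"
    let inner := PySem.Str.strip (PySem.Str.slice summary (some start) (some e))
    PySem.Str.join "" ["Summary:\n", inner]
  else
    PySem.Str.strip summary

-- the loop of _extract_highlights (state: acc, in_timeline)
def pvHighLoop : List String → List String → Bool → List String
  | [], acc, _ => acc
  | l :: rest, acc, inT =>
    let s := PySem.Str.rstrip l
    if s = "" ∨ s = "Summary:" ∨ s = "Conversation summary:" then
      pvHighLoop rest acc inT
    else if s = "- Key timeline:" then
      pvHighLoop rest acc true
    else if inT then
      pvHighLoop rest acc inT
    else
      pvHighLoop rest (acc ++ [s]) inT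

def pvExtractHighlights (summary : String) : List String :=
  pvHighLoop (PySem.Str.splitlines (pvFormatSummary summary)) [] false

-- the loop of _extract_timeline ('break' returns the accumulator)
def pvTimeLoop : List String → List String → Bool → List String
  | [], acc, _ => acc
  | l :: rest, acc, inT =>
    let s := PySem.Str.rstrip l
    if s = "- Key timeline:" then
      pvTimeLoop rest acc true
    else if !inT then
      pvTimeLoop rest acc inT
    else if s = "" then
      acc
    else
      pvTimeLoop rest (acc ++ [s]) inT

def pvExtractTimeline (summary : String) : List String :=
  pvTimeLoop (PySem.Str.splitlines (pvFormatSummary summary)) [] false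

def merge_summaries_py (existing : String) (new_summary : String) : String :=
  let prev_highlights := pvExtractHighlights existing
  let new_highlights := pvExtractHighlights new_summary
  let new_timeline := pvExtractTimeline new_summary
  let lines0 : List String := ["<summary>", "Conversation summary:"]
  let lines1 := if prev_highlights ≠ [] then
      lines0 ++ ["- Previously compacted context:"]
        ++ prev_highlights.map (fun l => PySem.Str.join "" ["  ", l])
    else lines0
  let lines2 := if new_highlights ≠ [] then
      lines1 ++ ["- Newly compacted context:"]
        ++ new_highlights.map (fun l => PySem.Str.join "" ["  ", l])
    else lines1
  let lines3 := if new_timeline ≠ [] then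
      lines2 ++ ["- Key timeline:"] ++ new_timeline
    else lines2
  PySem.Str.join "\n" (lines3 ++ ["</summary>"])

-- ===== PORT B =====
inductive pvPState
  | high
  | time
  | done
deriving DecidableEq, Repr

-- the single pass of _parse_summary (state machine over the formatted lines)
def pvParseLoop : List String → List String → List String → pvPState → List String × List String
  | [], hs, ts, _ => (hs, ts)
  | l :: rest, hs, ts, st =>
    let s := PySem.Str.rstrip l
    if s = "- Key timeline:" then
      pvParseLoop rest hs ts (if st = pvPState.high then pvPState.time else st)
    else
      match st with
      | pvPState.high =>
          if s ≠ "" ∧ s ≠ "Summary:" ∧ s ≠ "Conversation summary:" then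
            pvParseLoop rest (hs ++ [s]) ts pvPState.high
          else
            pvParseLoop rest hs ts pvPState.high
      | pvPState.time =>
          if s = "" then pvParseLoop rest hs ts pvPState.done
          else pvParseLoop rest hs (ts ++ [s]) pvPState.time
      | pvPState.done => pvParseLoop rest hs ts pvPState.done

def pvParseSummary (summary : String) : List String × List String :=
  pvParseLoop (PySem.Str.splitlines (pvFormatSummary summary)) [] [] pvPState.high

def pvSection (header : String) (items : List String) : List String :=
  if items ≠ [] then [header] ++ items else []

def merge_summaries_py_alt (existing : String) (new_summary : String) : String :=
  let prev_highlights := (pvParseSummary existing).1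
  let pn := pvParseSummary new_summary
  PySem.Str.join "\n"
    (["<summary>", "Conversation summary:"]
      ++ pvSection "- Previously compacted context:"
           (prev_highlights.map (fun h => PySem.Str.join "" ["  ", h]))
      ++ pvSection "- Newly compacted context:"
           (pn.1.map (fun h => PySem.Str.join "" ["  ", h]))
      ++ pvSection "- Key timeline:" pn.2
      ++ ["</summary>"])

-- ===== PRECONDITION & SPEC =====
def Spec_merge_summaries_py (existing : String) (new_summary : String) (out : String) : Prop := out = merge_summaries_py_alt existing new_summary
instance (existing : String) (new_summary : String) (out : String) : Decidable (Spec_merge_summaries_py existing new_summary out) := by unfold Spec_merge_summaries_py; infer_instance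

-- ===== CLAIM (what is proved, stated in full; the proofs are below) =====
def Claim_equal_merge_summaries_py : Prop := ∀ (existing : String) (new_summary : String), Dom_merge_summaries_py existing new_summary → Spec_merge_summaries_py existing new_summary (merge_summaries_py existing new_summary)

-- ===== LEMMAS AND PROOFS =====
lemma pvParse_eq (lines : List String) : ∀ (hs ts : List String),
    ((pvParseLoop lines hs ts pvPState.high).1 = pvHighLoop lines hs false) ∧
    ((pvParseLoop lines hs ts pvPState.time).1 = pvHighLoop lines hs true) ∧
    ((pvParseLoop lines hs ts pvPState.done).1 = pvHighLoop lines hs true) ∧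
    ((pvParseLoop lines hs ts pvPState.high).2 = pvTimeLoop lines ts false) ∧
    ((pvParseLoop lines hs ts pvPState.time).2 = pvTimeLoop lines ts true) ∧
    ((pvParseLoop lines hs ts pvPState.done).2 = ts) := by
  induction lines with
  | nil => intro hs ts; simp [pvParseLoop, pvHighLoop, pvTimeLoop]
  | cons l rest ih =>
    intro hs ts
    by_cases hm : PySem.Str.rstrip l = "- Key timeline:"
    · have h1 : ¬ (PySem.Str.rstrip l = "" ∨ PySem.Str.rstrip l = "Summary:" ∨
          PySem.Str.rstrip l = "Conversation summary:") := by
        rw [hm]; decide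
      simp [pvParseLoop, pvHighLoop, pvTimeLoop, hm, h1, ih]
    · by_cases h0 : PySem.Str.rstrip l = ""
      · simp [pvParseLoop, pvHighLoop, pvTimeLoop, hm, h0, ih]
      · by_cases hh : PySem.Str.rstrip l = "Summary:" ∨ PySem.Str.rstrip l = "Conversation summary:"
        · rcases hh with hh | hh <;> simp [pvParseLoop, pvHighLoop, pvTimeLoop, hm, h0, hh, ih]
        · push_neg at hh
          simp [pvParseLoop, pvHighLoop, pvTimeLoop, hm, h0, hh.1, hh.2, ih]

lemma pvParse_fst (summary : String) : (pvParseSummary summary).1 = pvExtractHighlights summary := by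
  unfold pvParseSummary pvExtractHighlights
  exact (pvParse_eq _ _ _).1

lemma pvParse_snd (summary : String) : (pvParseSummary summary).2 = pvExtractTimeline summary := by
  unfold pvParseSummary pvExtractTimeline
  exact (pvParse_eq _ _ _).2.2.2.1

-- ===== VERDICT (by name: the statement is the Claim_ definition above) =====
theorem merge_summaries_py_spec : Claim_equal_merge_summaries_py := by
  intro existing new_summary _
  unfold Spec_merge_summaries_py merge_summaries_py merge_summaries_py_alt
  simp only [pvParse_fst, pvParse_snd]
  by_cases h1 : pvExtractHighlights existing = [] <;>
    by_cases h2 : pvExtractHighlights new_summary = [] <;>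
      by_cases h3 : pvExtractTimeline new_summary = [] <;>
        simp [pvSection, h1, h2, h3]
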